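-- pv_equiv track=rewrite | github.com/karetz/Python_work | HW3 P2.py | sortedzip
-- ===== SOURCE A (Python) =====
-- def my_sort(L):
--     min_value=min(L)
--     index_min=L.index(min_value)
--     L.pop(index_min)
--     return min_value
--
-- def sortedzip(L1,L2,L3):
--     L_1=[]
--     L_2=[]
--     L_3=[]
--     L1=L1.copy()
--     L2=L2.copy()
--     L3=L3.copy()
--
--     while len(L1)>0:
--         L_1.append(my_sort(L1))
--     while len(L2)>0:
--         L_2.append(my_sort(L2))
--     while len(L3) > 0:
--         L_3.append(my_sort(L3))
--
--     return zip(L_1, L_2, L_3)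
-- ===== SOURCE B (Python) =====
-- def sortedzip(L1, L2, L3):
--     return zip(sorted(L1), sorted(L2), sorted(L3))
-- ===== Notes on version B (the rewrite author's own statement) =====
-- stated objective: faster
-- what changed: Replaces the hand-rolled selection sort (repeated min/index/pop on a copy of each list) with the built-in sorted() on each list, then zips.
import Mathlib
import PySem

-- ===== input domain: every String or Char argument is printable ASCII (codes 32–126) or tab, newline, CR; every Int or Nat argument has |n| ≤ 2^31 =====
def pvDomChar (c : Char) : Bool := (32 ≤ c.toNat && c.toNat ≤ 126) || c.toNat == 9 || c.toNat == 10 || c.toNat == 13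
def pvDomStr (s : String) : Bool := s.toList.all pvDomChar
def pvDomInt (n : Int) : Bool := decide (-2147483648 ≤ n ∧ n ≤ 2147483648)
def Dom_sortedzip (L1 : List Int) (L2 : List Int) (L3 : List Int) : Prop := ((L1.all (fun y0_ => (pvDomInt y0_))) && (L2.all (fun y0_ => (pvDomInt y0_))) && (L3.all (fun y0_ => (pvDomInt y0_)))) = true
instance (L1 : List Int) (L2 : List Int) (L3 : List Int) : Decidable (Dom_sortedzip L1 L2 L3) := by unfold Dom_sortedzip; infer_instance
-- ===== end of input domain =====

-- B replaces A's hand-rolled selection sort (repeated min/index/pop) with the built-in sorted() per list, then zips (O(n log n) vs O(n^2)); return value only (A mutates nothing the caller sees: it copies).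


-- ===== PORT A =====
-- zip(xs, ys, zs) materialised as a list of 3-element lists (shared by both ports: both Pythons end with zip)
def pvZip3 (xs ys zs : List Int) : List (List Int) :=
  match xs, ys, zs with
  | x :: xs', y :: ys', z :: zs' => [x, y, z] :: pvZip3 xs' ys' zs'
  | _, _, _ => []

-- my_sort(L): min_value = min(L); index_min = L.index(min_value); L.pop(index_min); return min_value
-- (returns the popped value together with the remaining list; none where Python would raise, unreachable under the len>0 guard)
def mySort (L : List Int) : Option (Int × List Int) :=
  match PySem.List.min? L (fun x => x) with
  | none => none
  | some m =>
    match PySem.List.index? L m with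
    | none => none
    | some i =>
      match PySem.List.pop? L (i : Int) with
      | none => none
      | some (v, rest) => some (v, rest)

-- while len(L) > 0: acc.append(my_sort(L))   (fuel = initial length makes the loop total; it only guards termination)
def selLoop : Nat → List Int → List Int
  | 0, _ => []
  | fuel + 1, L =>
    if 0 < L.length then
      match mySort L with
      | some (v, rest) => v :: selLoop fuel rest
      | none => []
    else []

def sortedzip (L1 : List Int) (L2 : List Int) (L3 : List Int) : List (List Int) :=
  pvZip3 (selLoop L1.length L1) (selLoop L2.length L2) (selLoop L3.length L3)

-- ===== PORT B =====
-- return zip(sorted(L1), sorted(L2), sorted(L3))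
def sortedzip_alt (L1 : List Int) (L2 : List Int) (L3 : List Int) : List (List Int) :=
  pvZip3 (PySem.List.sorted L1 (fun x => x) false)
         (PySem.List.sorted L2 (fun x => x) false)
         (PySem.List.sorted L3 (fun x => x) false)

-- ===== PRECONDITION & SPEC =====
def Spec_sortedzip (L1 : List Int) (L2 : List Int) (L3 : List Int) (out : List (List Int)) : Prop := out = sortedzip_alt L1 L2 L3
instance (L1 : List Int) (L2 : List Int) (L3 : List Int) (out : List (List Int)) : Decidable (Spec_sortedzip L1 L2 L3 out) := by unfold Spec_sortedzip; infer_instance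

-- ===== CLAIM (what is proved, stated in full; the proofs are below) =====
def Claim_equal_sortedzip : Prop := ∀ (L1 : List Int) (L2 : List Int) (L3 : List Int), Dom_sortedzip L1 L2 L3 → Spec_sortedzip L1 L2 L3 (sortedzip L1 L2 L3)

-- ===== LEMMAS AND PROOFS =====

-- one iteration of A's loop body: pops the first minimum; result permutes L, popped value is minimal
lemma mySort_spec (L : List Int) (hL : L ≠ []) :
    ∃ m rest, mySort L = some (m, rest) ∧ L.Perm (m :: rest) ∧ (∀ y ∈ L, m ≤ y) := by
  obtain ⟨m, hm⟩ : ∃ m, PySem.List.min? L (fun x => x) = some m := by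
    cases h : PySem.List.min? L (fun x => x) with
    | none => exact absurd ((PySem.List.min?_eq_none_iff L _).mp h) hL
    | some m => exact ⟨m, rfl⟩
  have hmem : m ∈ L := PySem.List.min?_mem hm
  have hmin : ∀ y ∈ L, m ≤ y := PySem.List.min?_isMin hm
  obtain ⟨k, hk⟩ : ∃ k, PySem.List.index? L m = some k := by
    cases h : PySem.List.index? L m with
    | none => exact absurd ((PySem.List.index?_eq_none_iff L m).mp h) (by simp [hmem])
    | some k => exact ⟨k, rfl⟩
  obtain ⟨hklt, hgetk, -⟩ := PySem.List.getElem_of_index?_eq_some hk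
  have hpop := PySem.List.pop?_natCast L k hklt
  refine ⟨m, L.eraseIdx k, ?_, ?_, hmin⟩
  · simp only [mySort, hm, hk, hpop, hgetk]
  · rw [← hgetk]; exact (List.getElem_cons_eraseIdx_perm hklt).symm

-- A's loop computes sorted(L)
lemma selLoop_eq (fuel : Nat) (L : List Int) (h : L.length ≤ fuel) :
    selLoop fuel L = PySem.List.sorted L (fun x => x) false := by
  induction fuel generalizing L with
  | zero =>
    have : L = [] := List.length_eq_zero_iff.mp (Nat.le_zero.mp h)
    subst this
    simp [selLoop, PySem.List.sorted_eq_nil_iff]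
  | succ fuel ih =>
    by_cases hL : L = []
    · subst hL; simp [selLoop, PySem.List.sorted_eq_nil_iff]
    · obtain ⟨m, rest, hstep, hperm, hmin⟩ := mySort_spec L hL
      have hlen : rest.length + 1 = L.length := by
        have := hperm.length_eq; simpa using this.symm
      have hrest : rest.length ≤ fuel := by omega
      have hpos : 0 < L.length := List.length_pos_of_ne_nil hL
      have hstep' : selLoop (fuel + 1) L = m :: selLoop fuel rest := by
        simp [selLoop, hpos, hstep]
      rw [hstep', ih rest hrest]
      refine (PySem.List.sorted_id_eq_of_perm_of_pairwise L
        (m :: PySem.List.sorted rest (fun x => x) false) ?_ ?_).symm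
      · exact (List.Perm.cons m (PySem.List.sorted_perm rest (fun x => x) false)).trans hperm.symm
      · refine List.pairwise_cons.mpr ⟨?_, ?_⟩
        · intro y hy
          have : y ∈ rest := (PySem.List.mem_sorted rest _ false y).mp hy
          exact hmin y (hperm.mem_iff.mpr (List.mem_cons_of_mem m this))
        · exact PySem.List.sorted_pairwise rest (fun x => x)

-- ===== VERDICT (by name: the statement is the Claim_ definition above) =====
theorem sortedzip_spec : Claim_equal_sortedzip := by
  intro L1 L2 L3 _
  unfold Spec_sortedzip sortedzip sortedzip_alt
  rw [selLoop_eq L1.length L1 le_rfl, selLoop_eq L2.length L2 le_rfl,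
      selLoop_eq L3.length L3 le_rfl]
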